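-- pv_equiv track=rewrite | github.com/oxillix/ccsa-solutions | python-5-lijsten-en-tuples/snake.py | laatste_levende_positie
-- ===== SOURCE A (Python) =====
-- def beweeg(coords, toets):
--     coords = list(coords)
--
--     if toets == '<':
--         coords[0] -= 1
--     elif toets == '>':
--         coords[0] += 1
--     elif toets == 'v':
--         coords[1] -= 1
--     elif toets == '^':
--         coords[1] += 1
--
--     return tuple(coords)
--
-- def teruggekeerd(toetsen):
--     tegenovergestelde_x_as = ['<', '>']
--     tegenovergestelde_y_as = ['^', 'v']
--
--     if sum(toets in toetsen for toets in tegenovergestelde_x_as) >= 2 or sum(toets in toetsen for toets in tegenovergestelde_y_as) >= 2: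
--         return True
--     else:
--         return False
--
-- def laatste_levende_positie(zetten):
--     coords = [0, 0]
--     geldigeZetten = 0
--
--     for i, zet in enumerate(zetten):
--         if i > 0:
--             if teruggekeerd([zetten[i-1], zet]):
--                 return (geldigeZetten, coords[0], coords[1])
--
--         coords = list(beweeg(tuple(coords), zet))
--         geldigeZetten += 1
--
--     return (geldigeZetten, coords[0], coords[1])
-- ===== SOURCE B (Python) =====
-- def laatste_levende_positie(zetten):
--     opp = {'<': '>', '>': '<', '^': 'v', 'v': '^'}
--     j = len(zetten)
--     for i, (prev, cur) in enumerate(zip(zetten, zetten[1:]), start=1):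
--         if opp.get(prev) == cur:
--             j = i
--             break
--     delta = {'<': (-1, 0), '>': (1, 0), 'v': (0, -1), '^': (0, 1)}
--     x = y = 0
--     for zet in zetten[:j]:
--         dx, dy = delta.get(zet, (0, 0))
--         x += dx
--         y += dy
--     return (j, x, y)
-- ===== Notes on version B (the rewrite author's own statement) =====
-- stated objective: simpler
-- what changed: A simulates the walk in one loop with an early return, testing reversal via membership sums over two-element lists and rebuilding list/tuple coordinate pairs each step; B instead first finds the stopping index j by scanning consecutive pairs with an opposites dict, then sums per-direction deltas over zetten[:j] in a separate pass.
import Mathlib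
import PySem

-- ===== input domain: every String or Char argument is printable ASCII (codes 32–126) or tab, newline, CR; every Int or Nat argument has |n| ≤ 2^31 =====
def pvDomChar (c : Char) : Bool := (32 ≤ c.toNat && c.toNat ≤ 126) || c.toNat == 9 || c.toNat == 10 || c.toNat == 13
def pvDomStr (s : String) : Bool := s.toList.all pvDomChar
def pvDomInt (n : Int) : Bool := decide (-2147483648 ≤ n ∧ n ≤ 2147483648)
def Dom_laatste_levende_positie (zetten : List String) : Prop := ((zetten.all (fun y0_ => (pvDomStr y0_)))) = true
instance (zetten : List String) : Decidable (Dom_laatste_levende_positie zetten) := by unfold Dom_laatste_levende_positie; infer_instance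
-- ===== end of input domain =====

-- B replaces A's single simulate-with-early-return loop by two separate passes — first
-- locating the stopping index from consecutive pairs via an opposites map, then summing
-- per-direction deltas over the prefix (objective: simpler; measured constant-factor faster).

-- ===== PORT A =====
def beweegA (coords : Int × Int) (toets : String) : Int × Int :=
  if toets = "<" then (coords.1 - 1, coords.2)
  else if toets = ">" then (coords.1 + 1, coords.2)
  else if toets = "v" then (coords.1, coords.2 - 1)
  else if toets = "^" then (coords.1, coords.2 + 1)
  else coords

def teruggekeerdA (toetsen : List String) : Bool :=
  decide (((if "<" ∈ toetsen then (1:Nat) else 0) + (if ">" ∈ toetsen then 1 else 0) ≥ 2) ∨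
          ((if "^" ∈ toetsen then (1:Nat) else 0) + (if "v" ∈ toetsen then 1 else 0) ≥ 2))

-- the for-loop over enumerate(zetten), carrying the index i; zetten.getD (i-1) ""
-- is zetten[i-1], always in range when this branch is reached (i > 0)
def loopA (zetten : List String) : Nat → List String → Int × Int → Int → Int × Int × Int
  | _, [], coords, g => (g, coords.1, coords.2)
  | i, zet :: rest, coords, g =>
    if i > 0 && teruggekeerdA [zetten.getD (i-1) "", zet] then (g, coords.1, coords.2)
    else loopA zetten (i+1) rest (beweegA coords zet) (g+1)

def laatste_levende_positie (zetten : List String) : Int × Int × Int :=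
  loopA zetten 0 zetten (0, 0) 0

-- ===== PORT B =====
def oppB (s : String) : Option String :=
  if s = "<" then some ">" else if s = ">" then some "<"
  else if s = "^" then some "v" else if s = "v" then some "^" else none

def deltaB (s : String) : Int × Int :=
  if s = "<" then (-1, 0) else if s = ">" then (1, 0)
  else if s = "v" then (0, -1) else if s = "^" then (0, 1) else (0, 0)

-- first pass of Source B: first index i (counting from 1) whose pair reverses, else len
def findJB : List (String × String) → Nat → Nat → Nat
  | [], _, len => len
  | (p, c) :: rest, i, len => if oppB p = some c then i else findJB rest (i+1) len

-- second pass of Source B: sum the deltas over the prefix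
def sumB (zetten : List String) : Int × Int :=
  zetten.foldl (fun a z => (a.1 + (deltaB z).1, a.2 + (deltaB z).2)) (0, 0)

def laatste_levende_positie_alt (zetten : List String) : Int × Int × Int :=
  let j := findJB (zetten.zip zetten.tail) 1 zetten.length
  let s := sumB (zetten.take j)
  ((j : Int), s.1, s.2)

-- ===== PRECONDITION & SPEC =====
def Spec_laatste_levende_positie (zetten : List String) (out : Int × Int × Int) : Prop := out = laatste_levende_positie_alt zetten
instance (zetten : List String) (out : Int × Int × Int) : Decidable (Spec_laatste_levende_positie zetten out) := by unfold Spec_laatste_levende_positie; infer_instance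

-- ===== CLAIM (what is proved, stated in full; the proofs are below) =====
def Claim_equal_laatste_levende_positie : Prop := ∀ (zetten : List String), Dom_laatste_levende_positie zetten → Spec_laatste_levende_positie zetten (laatste_levende_positie zetten)

-- ===== LEMMAS AND PROOFS =====

-- reversal test of A coincides with the opposites-map test of B
lemma terug_eq_opp (p z : String) : teruggekeerdA [p, z] = decide (oppB p = some z) := by
  simp only [teruggekeerdA, oppB, List.mem_cons, List.not_mem_nil, or_false]
  by_cases hp1 : p = "<" <;> by_cases hp2 : p = ">" <;> by_cases hp3 : p = "^" <;>
    by_cases hp4 : p = "v" <;>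
  by_cases hz1 : z = "<" <;> by_cases hz2 : z = ">" <;> by_cases hz3 : z = "^" <;>
    by_cases hz4 : z = "v" <;> simp_all [eq_comm]

lemma beweeg_eq_delta (c : Int × Int) (z : String) :
    beweegA c z = (c.1 + (deltaB z).1, c.2 + (deltaB z).2) := by
  simp only [beweegA, deltaB]
  split_ifs <;> simp <;> ring

-- abstract single-scan with an explicit previous element (proof device)
def simLoop (prev : String) : List String → Int × Int → Int → Int × Int × Int
  | [], c, g => (g, c.1, c.2)
  | z :: rest, c, g =>
    if oppB prev = some z then (g, c.1, c.2)
    else simLoop z rest (beweegA c z) (g + 1)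

-- local stopping length of the suffix
def jloc (prev : String) : List String → Nat
  | [] => 0
  | z :: rest => if oppB prev = some z then 0 else jloc z rest + 1

lemma loopA_eq_sim (zetten : List String) : ∀ (rest : List String) (i : Nat) (prev : String)
    (c : Int × Int) (g : Int), 1 ≤ i → zetten.getD (i-1) "" = prev → zetten.drop i = rest →
    loopA zetten i rest c g = simLoop prev rest c g := by
  intro rest
  induction rest with
  | nil => intro i prev c g _ _ _; simp [loopA, simLoop]
  | cons z r ih =>
    intro i prev c g hi hprev hdrop
    have hz : zetten[i]? = some z := by
      have := congrArg List.head? hdrop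
      simpa [List.head?_drop] using this
    have hdrop' : zetten.drop (i+1) = r := by
      rw [← List.tail_drop, hdrop]; rfl
    simp only [loopA, simLoop, Nat.lt_of_lt_of_le Nat.zero_lt_one hi, decide_true,
      Bool.true_and, hprev, terug_eq_opp]
    by_cases h : oppB prev = some z
    · simp [h]
    · simp only [h, decide_false, Bool.false_eq_true, if_false]
      exact ih (i+1) z _ _ (le_trans hi (Nat.le_succ i))
        (by simp [List.getD, hz]) hdrop'

lemma findJB_eq_jloc : ∀ (r : List String) (p : String) (i len : Nat),
    findJB ((p :: r).zip r) i (i + r.length) = i + jloc p r := by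
  intro r
  induction r with
  | nil => intro p i len; simp [findJB, jloc]
  | cons z r ih =>
    intro p i len
    simp only [List.zip_cons_cons, findJB, jloc]
    by_cases h : oppB p = some z
    · simp [h]
    · rw [if_neg h, if_neg h]
      simp only [List.length_cons]
      have hlen : i + (r.length + 1) = (i + 1) + r.length := by omega
      rw [hlen, ih z (i+1) len]
      omega

lemma sim_eq_two_pass (rest : List String) : ∀ (prev : String) (c : Int × Int) (g : Int),
    simLoop prev rest c g =
      (g + (jloc prev rest : Int),
       c.1 + (sumB (rest.take (jloc prev rest))).1,
       c.2 + (sumB (rest.take (jloc prev rest))).2) := by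
  induction rest with
  | nil => intro prev c g; simp [simLoop, jloc, sumB]
  | cons z r ih =>
    intro prev c g
    by_cases h : oppB prev = some z
    · simp [simLoop, jloc, h, sumB]
    · simp only [simLoop, jloc, h, if_false]
      rw [ih z]
      have hsum : ∀ k, sumB ((z :: r).take (k+1)) =
          ((deltaB z).1 + (sumB (r.take k)).1, (deltaB z).2 + (sumB (r.take k)).2) := by
        intro k
        simp only [List.take_succ_cons, sumB, List.foldl_cons]
        have : ∀ (l : List String) (a : Int × Int),
            l.foldl (fun a z => (a.1 + (deltaB z).1, a.2 + (deltaB z).2)) a =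
              (a.1 + (l.foldl (fun a z => (a.1 + (deltaB z).1, a.2 + (deltaB z).2)) (0,0)).1,
               a.2 + (l.foldl (fun a z => (a.1 + (deltaB z).1, a.2 + (deltaB z).2)) (0,0)).2) := by
          intro l
          induction l with
          | nil => intro a; simp
          | cons w l ihl =>
            intro a
            simp only [List.foldl_cons]
            rw [ihl, ihl ((0:Int)+(deltaB w).1, (0:Int)+(deltaB w).2)]
            simp; constructor <;> ring
        rw [this]
        simp
      rw [hsum, beweeg_eq_delta]
      simp only [Prod.mk.injEq]
      refine ⟨by push_cast; ring, by ring, by ring⟩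

-- ===== VERDICT (by name: the statement is the Claim_ definition above) =====
theorem laatste_levende_positie_spec : Claim_equal_laatste_levende_positie := by
  intro zetten _
  unfold Spec_laatste_levende_positie laatste_levende_positie laatste_levende_positie_alt
  cases zetten with
  | nil => simp [loopA, findJB, sumB]
  | cons z0 rest =>
    simp only [loopA, Nat.lt_irrefl, decide_false, Bool.false_and, Bool.false_eq_true, if_false]
    rw [loopA_eq_sim (z0 :: rest) rest 1 z0 _ _ le_rfl (by simp) (by simp),
        sim_eq_two_pass]
    have hj : findJB ((z0 :: rest).zip (z0 :: rest).tail) 1 (z0 :: rest).length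
        = 1 + jloc z0 rest := by
      have h := findJB_eq_jloc rest z0 1 0
      simpa [List.length_cons, Nat.add_comm] using h
    rw [hj]
    have htake : (z0 :: rest).take (1 + jloc z0 rest) = z0 :: rest.take (jloc z0 rest) := by
      rw [Nat.add_comm]; simp [List.take_succ_cons]
    rw [htake]
    have hsum : sumB (z0 :: rest.take (jloc z0 rest)) =
        ((deltaB z0).1 + (sumB (rest.take (jloc z0 rest))).1,
         (deltaB z0).2 + (sumB (rest.take (jloc z0 rest))).2) := by
      simp only [sumB, List.foldl_cons]
      have : ∀ (l : List String) (a : Int × Int),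
          l.foldl (fun a z => (a.1 + (deltaB z).1, a.2 + (deltaB z).2)) a =
            (a.1 + (l.foldl (fun a z => (a.1 + (deltaB z).1, a.2 + (deltaB z).2)) (0,0)).1,
             a.2 + (l.foldl (fun a z => (a.1 + (deltaB z).1, a.2 + (deltaB z).2)) (0,0)).2) := by
        intro l
        induction l with
        | nil => intro a; simp
        | cons w l ihl =>
          intro a
          simp only [List.foldl_cons]
          rw [ihl, ihl ((0:Int)+(deltaB w).1, (0:Int)+(deltaB w).2)]
          simp; constructor <;> ring
      rw [this]; simp
    rw [hsum, beweeg_eq_delta]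
    simp only [Prod.mk.injEq]
    refine ⟨by push_cast; ring, by simp, by simp⟩
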